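-- pv_equiv track=rewrite | github.com/ludvig-sandh/sts2-seed-tools | python-prototype/main.py | get_deterministic_hash_code
-- ===== SOURCE A (Python) =====
-- def int32(x: int) -> int:
--     return ((x + 2**31) % 2**32) - 2**31
--
-- def get_deterministic_hash_code(s: str) -> int:
--     num = 352654597
--     num2 = num
--
--     for i in range(0, len(s), 2):
--         num = int32(num * 33 ^ ord(s[i]))
--         if i == len(s) - 1:
--             break
--         num2 = int32(num2 * 33 ^ ord(s[i + 1]))
--
--     return int32(num + int32(num2 * 1566083941))
-- ===== SOURCE B (Python) =====
-- def int32(x: int) -> int: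
--     return ((x + 2**31) % 2**32) - 2**31
--
-- def _fold33(chars, num):
--     for c in chars:
--         num = int32(num * 33 ^ ord(c))
--     return num
--
-- def get_deterministic_hash_code(s: str) -> int:
--     num = _fold33(s[0::2], 352654597)
--     num2 = _fold33(s[1::2], 352654597)
--     return int32(num + int32(num2 * 1566083941))
-- ===== Notes on version B (the rewrite author's own statement) =====
-- stated objective: alternative
-- what changed: the single stride-2 index loop with its break on odd length is replaced by two independent passes: the even-position characters (s[0::2]) and the odd-position characters (s[1::2]) are each folded separately with the same int32 step, then combined as before
import Mathlib
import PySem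

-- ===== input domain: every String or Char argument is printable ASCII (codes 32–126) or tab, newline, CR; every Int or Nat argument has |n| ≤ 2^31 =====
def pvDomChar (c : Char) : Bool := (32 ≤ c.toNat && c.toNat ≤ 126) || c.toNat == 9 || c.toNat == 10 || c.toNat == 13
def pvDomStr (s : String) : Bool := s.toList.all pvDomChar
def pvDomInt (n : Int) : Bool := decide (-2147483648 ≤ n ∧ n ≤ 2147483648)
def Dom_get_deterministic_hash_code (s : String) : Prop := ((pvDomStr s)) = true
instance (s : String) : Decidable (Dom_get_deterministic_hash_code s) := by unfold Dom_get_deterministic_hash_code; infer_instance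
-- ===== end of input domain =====

-- B replaces A's single stride-2 index loop (with break) by two independent slice passes
-- (even- and odd-position characters folded separately); same cost, alternative decomposition.


-- shared helper: Python's int32(x) = ((x + 2**31) % 2**32) - 2**31
def pvInt32 (x : Int) : Int := PySem.Int.mod (x + 2147483648) 4294967296 - 2147483648

-- ===== PORT A =====
-- A's 'for i in range(0, len(s), 2)' loop, carrying (num, num2); the [c] case is the
-- 'i == len(s) - 1' break (num updated, num2 not).
def pvHashLoop : List Char → Int → Int → Int × Int
  | [], num, num2 => (num, num2)
  | [c], num, num2 => (pvInt32 (PySem.Int.bxor (num * 33) (c.toNat : Int)), num2)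
  | c1 :: c2 :: rest, num, num2 =>
      pvHashLoop rest (pvInt32 (PySem.Int.bxor (num * 33) (c1.toNat : Int)))
                      (pvInt32 (PySem.Int.bxor (num2 * 33) (c2.toNat : Int)))

def get_deterministic_hash_code (s : String) : Int :=
  let p := pvHashLoop s.toList 352654597 352654597
  pvInt32 (p.1 + pvInt32 (p.2 * 1566083941))

-- ===== PORT B =====
-- B's helper _fold33: fold num = int32(num*33 ^ ord(c)) over a character sequence
def pvFoldHash (cs : List Char) (num : Int) : Int :=
  cs.foldl (fun n c => pvInt32 (PySem.Int.bxor (n * 33) (c.toNat : Int))) num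

def get_deterministic_hash_code_alt (s : String) : Int :=
  let num := pvFoldHash ((PySem.List.slice? s.toList (some 0) none 2).getD []) 352654597
  let num2 := pvFoldHash ((PySem.List.slice? s.toList (some 1) none 2).getD []) 352654597
  pvInt32 (num + pvInt32 (num2 * 1566083941))

-- ===== PRECONDITION & SPEC =====
def Spec_get_deterministic_hash_code (s : String) (out : Int) : Prop := out = get_deterministic_hash_code_alt s
instance (s : String) (out : Int) : Decidable (Spec_get_deterministic_hash_code s out) := by unfold Spec_get_deterministic_hash_code; infer_instance

-- ===== CLAIM (what is proved, stated in full; the proofs are below) =====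
def Claim_equal_get_deterministic_hash_code : Prop := ∀ (s : String), Dom_get_deterministic_hash_code s → Spec_get_deterministic_hash_code s (get_deterministic_hash_code s)

-- ===== LEMMAS AND PROOFS =====

-- proof-side characterisations of the two slices
def pvEvens {α : Type} : List α → List α
  | [] => []
  | [a] => [a]
  | a :: _ :: t => a :: pvEvens t

def pvOdds {α : Type} : List α → List α
  | [] => []
  | [_] => []
  | _ :: b :: t => b :: pvOdds t

theorem pv_evens_spec {α : Type} : ∀ (xs : List α),
    (List.range ((xs.length + 1) / 2)).filterMap (fun k => xs[2 * k]?) = pvEvens xs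
  | [] => by simp [pvEvens]
  | [a] => by simp [pvEvens]
  | a :: b :: t => by
      have ih := pv_evens_spec t
      have hlen : ((a :: b :: t).length + 1) / 2 = (t.length + 1) / 2 + 1 := by
        simp only [List.length_cons]; omega
      have hf : ((fun k => (a :: b :: t)[2 * k]?) ∘ Nat.succ) = (fun k => t[2 * k]?) := by
        funext k
        simp [Nat.mul_succ]
      rw [hlen, List.range_succ_eq_map, List.filterMap_cons, List.filterMap_map, hf]
      simpa [pvEvens] using ih

theorem pv_odds_spec {α : Type} : ∀ (xs : List α),
    (List.range (xs.length / 2)).filterMap (fun k => xs[2 * k + 1]?) = pvOdds xs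
  | [] => by simp [pvOdds]
  | [a] => by simp [pvOdds]
  | a :: b :: t => by
      have ih := pv_odds_spec t
      have hlen : (a :: b :: t).length / 2 = t.length / 2 + 1 := by
        simp only [List.length_cons]; omega
      have hf : ((fun k => (a :: b :: t)[2 * k + 1]?) ∘ Nat.succ) = (fun k => t[2 * k + 1]?) := by
        funext k
        simp [Nat.mul_succ]
      rw [hlen, List.range_succ_eq_map, List.filterMap_cons, List.filterMap_map, hf]
      simpa [pvOdds] using ih

theorem pv_slice_evens {α : Type} (xs : List α) :
    PySem.List.slice? xs (some 0) none 2 = some (pvEvens xs) := by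
  simp only [PySem.List.slice?, PySem.List.sliceIndices]
  norm_num
  have hc : (if 0 < xs.length then (((xs.length : Int) + 2 - 1) / 2).toNat else 0) = (xs.length + 1) / 2 := by
    split_ifs <;> omega
  have hfun : (fun k : Nat => xs[(2 * (k : Int)).toNat]?) = (fun k => xs[2 * k]?) := by
    funext k
    have h2 : ((2 * (k : Int)).toNat) = 2 * k := by omega
    rw [h2]
  rw [hc, hfun, pv_evens_spec]

theorem pv_slice_odds {α : Type} (xs : List α) :
    PySem.List.slice? xs (some 1) none 2 = some (pvOdds xs) := by
  cases xs with
  | nil => simp [PySem.List.slice?, PySem.List.sliceIndices, pvOdds]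
  | cons a t =>
    simp only [PySem.List.slice?, PySem.List.sliceIndices]
    norm_num
    have hc : (if 0 < t.length then (((t.length : Int) + 2 - 1) / 2).toNat else 0) = (t.length + 1) / 2 := by
      split_ifs <;> omega
    have hfun : (fun k : Nat => (a :: t)[(1 + 2 * (k : Int)).toNat]?) = (fun k => (a :: t)[2 * k + 1]?) := by
      funext k
      have h2 : ((1 + 2 * (k : Int)).toNat) = 2 * k + 1 := by omega
      rw [h2]
    rw [hc, hfun]
    simpa using pv_odds_spec (a :: t)

theorem pv_loop_eq : ∀ (cs : List Char) (n n2 : Int),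
    pvHashLoop cs n n2 = (pvFoldHash (pvEvens cs) n, pvFoldHash (pvOdds cs) n2)
  | [], n, n2 => by simp [pvHashLoop, pvEvens, pvOdds, pvFoldHash]
  | [c], n, n2 => by simp [pvHashLoop, pvEvens, pvOdds, pvFoldHash]
  | c1 :: c2 :: t, n, n2 => by
      rw [pvHashLoop, pv_loop_eq t]
      simp [pvEvens, pvOdds, pvFoldHash]

-- ===== VERDICT (by name: the statement is the Claim_ definition above) =====
theorem get_deterministic_hash_code_spec : Claim_equal_get_deterministic_hash_code := by
  intro s _
  unfold Spec_get_deterministic_hash_code get_deterministic_hash_code get_deterministic_hash_code_alt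
  rw [pv_slice_evens, pv_slice_odds, pv_loop_eq]
  simp
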